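-- pv_equiv track=rewrite | github.com/jannajchan/python | forMyKnowledge/StringIndexingAndSearching.py | find_whole_word_myVersion
-- ===== SOURCE A (Python) =====
-- def find_whole_word_myVersion(sentence: str, word: str) -> int:
--     if not word:
--         return 0
--
--     wordList = sentence.split()
--     for i, value in enumerate(wordList):
--         if value.lower() == word.lower():
--             index = 0
--             for j in range(0, i):
--                 index += len(wordList[j]) + 1
--             return index
--     return -1
-- ===== SOURCE B (Python) =====
-- def find_whole_word_myVersion(sentence: str, word: str) -> int:
--     if not word:
--         return 0
--     words = sentence.split()
--     starts = [0]
--     for w in words: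
--         starts.append(starts[-1] + len(w) + 1)
--     target = word.lower()
--     for w, s in zip(words, starts):
--         if w.lower() == target:
--             return s
--     return -1
-- ===== Notes on version B (the rewrite author's own statement) =====
-- stated objective: alternative
-- what changed: Replaces A's nested loops (scan for the match, then an inner loop re-summing preceding word lengths) with a staged pipeline: precompute the start offset of every word as a prefix-sum list, zip it with the words, and return the offset paired with the first case-insensitive match.
import Mathlib
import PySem

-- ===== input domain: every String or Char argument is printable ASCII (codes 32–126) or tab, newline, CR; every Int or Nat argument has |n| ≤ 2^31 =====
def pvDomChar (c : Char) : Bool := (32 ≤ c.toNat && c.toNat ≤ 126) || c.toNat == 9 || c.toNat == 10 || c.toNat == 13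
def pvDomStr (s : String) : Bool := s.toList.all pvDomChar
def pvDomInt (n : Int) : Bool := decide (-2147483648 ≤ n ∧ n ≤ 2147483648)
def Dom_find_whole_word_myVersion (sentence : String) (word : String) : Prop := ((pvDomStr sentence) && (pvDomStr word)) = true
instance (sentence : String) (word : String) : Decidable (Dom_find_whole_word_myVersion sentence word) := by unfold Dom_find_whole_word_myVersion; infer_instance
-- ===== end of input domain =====

-- B replaces A's nested loops by a staged pipeline: prefix-sum start offsets, zip with the words, look up the first match.
-- ===== PORT A =====
def pvAGo (wl : List String) (word : String) : List String → Int → Int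
  | [], _ => -1
  | v :: rest, i =>
    if PySem.Str.lower v == PySem.Str.lower word then
      (PySem.List.pyRange 0 i 1).foldl
        (fun acc j => acc + PySem.Str.len (PySem.List.pyGetD wl j "") + 1) 0
    else pvAGo wl word rest (i + 1)

def find_whole_word_myVersion (sentence : String) (word : String) : Int :=
  if word == "" then 0
  else pvAGo (PySem.Str.split₀ sentence) word (PySem.Str.split₀ sentence) 0

-- ===== PORT B =====
-- starts = [0]; for w in words: starts.append(starts[-1] + len(w) + 1)
def pvStarts : List String → Int → List Int
  | [], acc => [acc]
  | w :: rest, acc => acc :: pvStarts rest (acc + PySem.Str.len w + 1)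

-- for w, s in zip(words, starts): if w.lower() == target: return s; return -1
def pvLookup (target : String) : List (String × Int) → Int
  | [] => -1
  | (w, s) :: rest => if PySem.Str.lower w == target then s else pvLookup target rest

def find_whole_word_myVersion_alt (sentence : String) (word : String) : Int :=
  if word == "" then 0
  else
    let words := PySem.Str.split₀ sentence
    pvLookup (PySem.Str.lower word) (words.zip (pvStarts words 0))

-- ===== PRECONDITION & SPEC =====
def Spec_find_whole_word_myVersion (sentence : String) (word : String) (out : Int) : Prop := out = find_whole_word_myVersion_alt sentence word
instance (sentence : String) (word : String) (out : Int) : Decidable (Spec_find_whole_word_myVersion sentence word out) := by unfold Spec_find_whole_word_myVersion; infer_instance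

-- ===== CLAIM (what is proved, stated in full; the proofs are below) =====
def Claim_equal_find_whole_word_myVersion : Prop := ∀ (sentence : String) (word : String), Dom_find_whole_word_myVersion sentence word → Spec_find_whole_word_myVersion sentence word (find_whole_word_myVersion sentence word)

-- ===== LEMMAS AND PROOFS =====

def pvS (l : List String) : Int := l.foldl (fun acc v => acc + PySem.Str.len v + 1) 0

lemma pvS_append_singleton (l : List String) (v : String) :
    pvS (l ++ [v]) = pvS l + PySem.Str.len v + 1 := by
  simp [pvS, List.foldl_append]

lemma pvSum_eq (pre rest : List String) :
    (PySem.List.pyRange 0 (pre.length : Int) 1).foldl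
      (fun acc j => acc + PySem.Str.len (PySem.List.pyGetD (pre ++ rest) j "") + 1) 0 = pvS pre := by
  have hc : (PySem.List.pyRange 0 (pre.length : Int) 1).foldl
      (fun acc j => acc + PySem.Str.len (PySem.List.pyGetD (pre ++ rest) j "") + 1) 0
      = (PySem.List.pyRange 0 (pre.length : Int) 1).foldl
      (fun acc j => acc + PySem.Str.len (PySem.List.pyGetD pre j "") + 1) 0 := by
    apply PySem.List.foldl_congr_mem
    intro acc j hj
    rw [PySem.List.mem_pyRange_one] at hj
    rw [PySem.List.pyGetD_eq_getElem (pre ++ rest) "" hj.1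
          (by simpa using lt_of_lt_of_le hj.2 (by simp)),
        PySem.List.pyGetD_eq_getElem pre "" hj.1 (by simpa using hj.2),
        List.getElem_append_left]
  rw [hc]
  have := PySem.List.foldl_pyRange_zero_pyGetD' pre ""
      (fun acc v => acc + PySem.Str.len v + 1) 0
  simpa [pvS] using this

lemma pvGo_eq (word : String) :
    ∀ (rest pre : List String),
      pvAGo (pre ++ rest) word rest (pre.length : Int)
        = pvLookup (PySem.Str.lower word) (rest.zip (pvStarts rest (pvS pre))) := by
  intro rest
  induction rest with
  | nil => intro pre; simp [pvAGo, pvStarts, pvLookup]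
  | cons v rs ih =>
    intro pre
    by_cases h : PySem.Str.lower v == PySem.Str.lower word
    · simp only [pvAGo, pvStarts, List.zip_cons_cons, pvLookup, h, if_pos]
      exact pvSum_eq pre (v :: rs)
    · have := ih (pre ++ [v])
      simp only [List.append_assoc, List.singleton_append] at this
      simp only [pvAGo, pvStarts, List.zip_cons_cons, pvLookup, h, Bool.false_eq_true, if_false]
      rw [show ((pre.length : Int) + 1) = (((pre ++ [v]).length : Int)) by simp]
      rw [this, pvS_append_singleton]

-- ===== VERDICT (by name: the statement is the Claim_ definition above) =====
theorem find_whole_word_myVersion_spec : Claim_equal_find_whole_word_myVersion := by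
  intro sentence word _
  unfold Spec_find_whole_word_myVersion find_whole_word_myVersion find_whole_word_myVersion_alt
  by_cases h : word == ""
  · simp [h]
  · simpa [h, pvS] using pvGo_eq word (PySem.Str.split₀ sentence) []
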